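-- pv_equiv track=rewrite | github.com/paulklemstine/factor | v29_sos_factoring.py | gauss_gcd
-- ===== SOURCE A (Python) =====
-- def gauss_gcd(a_re, a_im, b_re, b_im):
--     """GCD in Z[i] using Euclidean algorithm.
--     Returns (re, im) of gcd(a_re+a_im*i, b_re+b_im*i)."""
--     # Normalize: gcd in Z[i] via Euclidean algorithm
--     # Division in Z[i]: (a+bi)/(c+di) = ((ac+bd) + (bc-ad)i) / (c²+d²)
--     # Round to nearest Gaussian integer
--     while b_re != 0 or b_im != 0:
--         # Compute a / b in Z[i], round to nearest
--         norm_b = b_re * b_re + b_im * b_im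
--         if norm_b == 0:
--             break
--         # (a_re + a_im*i) * conj(b_re + b_im*i) = (a_re*b_re + a_im*b_im) + (a_im*b_re - a_re*b_im)*i
--         num_re = a_re * b_re + a_im * b_im
--         num_im = a_im * b_re - a_re * b_im
--         # Round to nearest integer (round half to even doesn't matter, any rounding works)
--         q_re = round_div(num_re, norm_b)
--         q_im = round_div(num_im, norm_b)
--         # remainder = a - q*b
--         r_re = a_re - (q_re * b_re - q_im * b_im)
--         r_im = a_im - (q_re * b_im + q_im * b_re)
--         a_re, a_im = b_re, b_im
--         b_re, b_im = r_re, r_im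
--     return a_re, a_im
--
-- def round_div(a, b):
--     """Round a/b to nearest integer."""
--     if b < 0:
--         a, b = -a, -b
--     return (2 * a + b) // (2 * b)
-- ===== SOURCE B (Python) =====
-- def gauss_gcd(a_re, a_im, b_re, b_im):
--     """GCD in Z[i], recursive Euclidean algorithm.
--     Returns (re, im) of gcd(a_re+a_im*i, b_re+b_im*i)."""
--     if b_re == 0 and b_im == 0:
--         return (a_re, a_im)
--     q_re, q_im = _gauss_quot(a_re, a_im, b_re, b_im)
--     qb_re = q_re * b_re - q_im * b_im
--     qb_im = q_re * b_im + q_im * b_re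
--     return gauss_gcd(b_re, b_im, a_re - qb_re, a_im - qb_im)
--
-- def _gauss_quot(a_re, a_im, b_re, b_im):
--     """Nearest-Gaussian-integer quotient (a_re+a_im*i) / (b_re+b_im*i)."""
--     norm_b = b_re * b_re + b_im * b_im
--     return (round_div(a_re * b_re + a_im * b_im, norm_b),
--             round_div(a_im * b_re - a_re * b_im, norm_b))
--
-- def round_div(a, b):
--     """Round a/b to nearest integer."""
--     if b < 0:
--         a, b = -a, -b
--     return (2 * a + b) // (2 * b)
-- ===== Notes on version B (the rewrite author's own statement) =====
-- stated objective: simpler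
-- what changed: The while-loop with 4-variable state swapping and a dead norm_b==0 break is replaced by a direct recursion on the Euclidean recurrence, with the nearest-Gaussian-integer quotient factored into a helper; the same rounding yields the identical unit-associate of the gcd.
import Mathlib
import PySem

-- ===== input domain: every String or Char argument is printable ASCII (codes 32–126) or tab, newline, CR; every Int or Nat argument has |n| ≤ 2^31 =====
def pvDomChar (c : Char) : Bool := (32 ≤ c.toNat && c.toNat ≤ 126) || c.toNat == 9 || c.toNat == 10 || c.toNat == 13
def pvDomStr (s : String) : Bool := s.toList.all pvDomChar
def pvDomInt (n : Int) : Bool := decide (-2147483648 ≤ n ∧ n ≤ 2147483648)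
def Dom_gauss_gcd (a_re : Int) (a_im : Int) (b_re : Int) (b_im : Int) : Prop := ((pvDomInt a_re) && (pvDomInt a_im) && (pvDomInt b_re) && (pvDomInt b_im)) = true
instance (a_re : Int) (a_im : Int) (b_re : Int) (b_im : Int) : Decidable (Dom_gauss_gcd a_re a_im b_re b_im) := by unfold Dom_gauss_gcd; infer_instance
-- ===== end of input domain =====

-- B replaces A's while-loop (with its dead norm_b == 0 break) by a direct recursion on the
-- Euclidean recurrence, factoring the nearest-Gaussian-integer quotient into a helper;
-- same rounding, identical output (objective: simpler).


-- shared helper of BOTH Pythons: exact port of round_div (Python // is floor division)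
def round_div (a : Int) (b : Int) : Int :=
  if b < 0 then PySem.Int.floordiv (2 * (-a) + (-b)) (2 * (-b))
  else PySem.Int.floordiv (2 * a + b) (2 * b)

-- ===== PORT A =====
-- A's while loop, transliterated as a tail recursion over the same 4-variable state;
-- the inner 'if norm_b == 0: break' is kept as written.  The fuel argument is only a
-- totality guard: norm(b) strictly decreases, so fuel = norm(b)+1 is never exhausted
-- (proved below in gauss_gcd_loop_eq_rec / gauss_gcd_eq_alt).
def gauss_gcd_loop : Nat → Int → Int → Int → Int → Int × Int
  | 0, a_re, a_im, _, _ => (a_re, a_im)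
  | fuel + 1, a_re, a_im, b_re, b_im =>
    if b_re ≠ 0 ∨ b_im ≠ 0 then
      let norm_b := b_re * b_re + b_im * b_im
      if norm_b = 0 then (a_re, a_im)
      else
        let num_re := a_re * b_re + a_im * b_im
        let num_im := a_im * b_re - a_re * b_im
        let q_re := round_div num_re norm_b
        let q_im := round_div num_im norm_b
        let r_re := a_re - (q_re * b_re - q_im * b_im)
        let r_im := a_im - (q_re * b_im + q_im * b_re)
        gauss_gcd_loop fuel b_re b_im r_re r_im
    else (a_re, a_im)

def gauss_gcd (a_re : Int) (a_im : Int) (b_re : Int) (b_im : Int) : Int × Int :=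
  gauss_gcd_loop ((b_re * b_re + b_im * b_im).toNat + 1) a_re a_im b_re b_im

-- ===== PORT B =====
def gauss_quot (a_re : Int) (a_im : Int) (b_re : Int) (b_im : Int) : Int × Int :=
  let norm_b := b_re * b_re + b_im * b_im
  (round_div (a_re * b_re + a_im * b_im) norm_b,
   round_div (a_im * b_re - a_re * b_im) norm_b)

-- Source B's direct recursion; fuel is again only a totality guard, never exhausted.
def gauss_gcd_rec : Nat → Int → Int → Int → Int → Int × Int
  | 0, a_re, a_im, _, _ => (a_re, a_im)
  | fuel + 1, a_re, a_im, b_re, b_im =>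
    if b_re = 0 ∧ b_im = 0 then (a_re, a_im)
    else
      let q := gauss_quot a_re a_im b_re b_im
      let qb_re := q.1 * b_re - q.2 * b_im
      let qb_im := q.1 * b_im + q.2 * b_re
      gauss_gcd_rec fuel b_re b_im (a_re - qb_re) (a_im - qb_im)

def gauss_gcd_alt (a_re : Int) (a_im : Int) (b_re : Int) (b_im : Int) : Int × Int :=
  gauss_gcd_rec ((b_re * b_re + b_im * b_im).toNat + 1) a_re a_im b_re b_im

-- ===== PRECONDITION & SPEC =====
def Spec_gauss_gcd (a_re : Int) (a_im : Int) (b_re : Int) (b_im : Int) (out : Int × Int) : Prop := out = gauss_gcd_alt a_re a_im b_re b_im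
instance (a_re : Int) (a_im : Int) (b_re : Int) (b_im : Int) (out : Int × Int) : Decidable (Spec_gauss_gcd a_re a_im b_re b_im out) := by unfold Spec_gauss_gcd; infer_instance

-- ===== CLAIM (what is proved, stated in full; the proofs are below) =====
def Claim_equal_gauss_gcd : Prop := ∀ (a_re : Int) (a_im : Int) (b_re : Int) (b_im : Int), Dom_gauss_gcd a_re a_im b_re b_im → Spec_gauss_gcd a_re a_im b_re b_im (gauss_gcd a_re a_im b_re b_im)

-- ===== LEMMAS AND PROOFS =====
-- |a - round_div a b * b| ≤ |b|/2, stated squared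
theorem round_div_bound (a b : Int) (hb : b ≠ 0) :
    (2 * (a - round_div a b * b))^2 ≤ b^2 := by
  rcases lt_or_gt_of_ne hb with h | h
  · have hpos : (0:Int) < 2 * (-b) := by omega
    have := (PySem.Int.floordiv_eq_iff_of_pos (a := 2 * (-a) + (-b)) (b := 2 * (-b))
      (q := PySem.Int.floordiv (2 * (-a) + (-b)) (2 * (-b))) hpos).mp rfl
    unfold round_div
    rw [if_pos h]
    nlinarith [this.1, this.2]
  · have hpos : (0:Int) < 2 * b := by omega
    have := (PySem.Int.floordiv_eq_iff_of_pos (a := 2 * a + b) (b := 2 * b)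
      (q := PySem.Int.floordiv (2 * a + b) (2 * b)) hpos).mp rfl
    unfold round_div
    rw [if_neg (by omega)]
    nlinarith [this.1, this.2]

-- one Euclidean step strictly decreases the norm of the second argument
theorem step_dec (a_re a_im b_re b_im : Int) (hb : ¬(b_re = 0 ∧ b_im = 0)) :
    ((a_re - (round_div (a_re * b_re + a_im * b_im) (b_re * b_re + b_im * b_im) * b_re
              - round_div (a_im * b_re - a_re * b_im) (b_re * b_re + b_im * b_im) * b_im))
      * (a_re - (round_div (a_re * b_re + a_im * b_im) (b_re * b_re + b_im * b_im) * b_re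
              - round_div (a_im * b_re - a_re * b_im) (b_re * b_re + b_im * b_im) * b_im))
     + (a_im - (round_div (a_re * b_re + a_im * b_im) (b_re * b_re + b_im * b_im) * b_im
              + round_div (a_im * b_re - a_re * b_im) (b_re * b_re + b_im * b_im) * b_re))
      * (a_im - (round_div (a_re * b_re + a_im * b_im) (b_re * b_re + b_im * b_im) * b_im
              + round_div (a_im * b_re - a_re * b_im) (b_re * b_re + b_im * b_im) * b_re))).toNat
    < (b_re * b_re + b_im * b_im).toNat := by
  set n : Int := b_re * b_re + b_im * b_im with hn
  have hnpos : 0 < n := by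
    rcases not_and_or.mp hb with h | h <;>
      nlinarith [mul_self_pos.mpr h, mul_self_nonneg b_re, mul_self_nonneg b_im]
  set qr : Int := round_div (a_re * b_re + a_im * b_im) n with hqr
  set qi : Int := round_div (a_im * b_re - a_re * b_im) n with hqi
  have h1 := round_div_bound (a_re * b_re + a_im * b_im) n (by omega)
  have h2 := round_div_bound (a_im * b_re - a_re * b_im) n (by omega)
  rw [← hqr] at h1
  rw [← hqi] at h2
  set rr : Int := a_re - (qr * b_re - qi * b_im) with hrr
  set ri : Int := a_im - (qr * b_im + qi * b_re) with hri
  show (rr * rr + ri * ri).toNat < n.toNat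
  have key : (rr * rr + ri * ri) * n = (a_re * b_re + a_im * b_im - qr * n)^2
      + (a_im * b_re - a_re * b_im - qi * n)^2 := by
    rw [hrr, hri, hn]; ring
  have hR0 : 0 ≤ rr * rr + ri * ri := by nlinarith [mul_self_nonneg rr, mul_self_nonneg ri]
  have hlt : rr * rr + ri * ri < n := by nlinarith [key, h1, h2]
  omega

-- with enough fuel, A's loop and B's recursion compute the same value
theorem gauss_gcd_loop_eq_rec (fuel : Nat) :
    ∀ (a_re a_im b_re b_im : Int), (b_re * b_re + b_im * b_im).toNat < fuel →
      gauss_gcd_loop fuel a_re a_im b_re b_im = gauss_gcd_rec fuel a_re a_im b_re b_im := by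
  induction fuel with
  | zero => intro a_re a_im b_re b_im h; omega
  | succ fuel ih =>
    intro a_re a_im b_re b_im hf
    by_cases hb : b_re = 0 ∧ b_im = 0
    · rw [gauss_gcd_loop, gauss_gcd_rec, if_pos hb, if_neg (by tauto)]
    · have hg : b_re ≠ 0 ∨ b_im ≠ 0 := by tauto
      have hn0 : ¬ (b_re * b_re + b_im * b_im = 0) := by
        have := step_dec a_re a_im b_re b_im hb
        intro h0; omega
      rw [gauss_gcd_loop, gauss_gcd_rec, if_pos hg, if_neg hb]
      simp only [gauss_quot]
      rw [if_neg hn0]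
      exact ih _ _ _ _ (by have := step_dec a_re a_im b_re b_im hb; omega)

-- the fuel used by the two entry points is never exhausted
theorem gauss_gcd_eq_alt (a_re a_im b_re b_im : Int) :
    gauss_gcd a_re a_im b_re b_im = gauss_gcd_alt a_re a_im b_re b_im := by
  unfold gauss_gcd gauss_gcd_alt
  exact gauss_gcd_loop_eq_rec _ a_re a_im b_re b_im (by omega)

-- ===== VERDICT (by name: the statement is the Claim_ definition above) =====
theorem gauss_gcd_spec : Claim_equal_gauss_gcd := by
  intro a_re a_im b_re b_im _
  exact gauss_gcd_eq_alt a_re a_im b_re b_im
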